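-- pv_equiv track=rewrite | github.com/Seb010/Python-Password-Checker | password.py | does_password_contain_symbols_only
-- ===== SOURCE A (Python) =====
-- def does_password_contain_symbols_only(password):
--     symbols = "!$%^&*()_-=+"
--     counter = 0
--     length = len(password)
--     for i in password:
--         if i in symbols:
--             counter = counter + 1
--     return counter == length
-- ===== SOURCE B (Python) =====
-- def does_password_contain_symbols_only(password):
--     return password.strip("!$%^&*()_-=+") == ""
-- ===== Notes on version B (the rewrite author's own statement) =====
-- stated objective: idiomatic
-- what changed: Replaces the counting loop (count matching chars, compare to length) with str.strip: stripping every allowed symbol from both ends leaves the empty string exactly when the password consists only of symbols.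
import Mathlib
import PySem

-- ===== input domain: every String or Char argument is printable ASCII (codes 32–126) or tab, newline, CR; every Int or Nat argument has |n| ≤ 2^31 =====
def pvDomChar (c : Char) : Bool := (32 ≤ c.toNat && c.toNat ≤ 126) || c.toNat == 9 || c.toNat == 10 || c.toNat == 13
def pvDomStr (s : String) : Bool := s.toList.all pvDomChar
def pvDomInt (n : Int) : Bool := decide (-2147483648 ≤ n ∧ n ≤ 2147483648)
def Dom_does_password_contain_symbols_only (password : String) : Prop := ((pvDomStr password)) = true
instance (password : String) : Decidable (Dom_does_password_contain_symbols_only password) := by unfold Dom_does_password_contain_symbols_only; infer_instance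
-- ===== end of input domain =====

-- B replaces A's counting loop with str.strip over the symbol set: stripping leaves "" exactly when all chars are symbols (idiomatic; same results).
-- ===== PORT A =====
def does_password_contain_symbols_only (password : String) : Bool :=
  let symbols : String := "!$%^&*()_-=+"
  let counter : Int := 0
  let length : Int := PySem.Str.len password
  let counter := password.toList.foldl
    (fun counter i => if symbols.toList.contains i then counter + 1 else counter) counter
  decide (counter = length)

-- ===== PORT B =====
def does_password_contain_symbols_only_alt (password : String) : Bool :=
  PySem.Str.stripChars password "!$%^&*()_-=+" == ""

-- ===== PRECONDITION & SPEC =====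
def Spec_does_password_contain_symbols_only (password : String) (out : Bool) : Prop := out = does_password_contain_symbols_only_alt password
instance (password : String) (out : Bool) : Decidable (Spec_does_password_contain_symbols_only password out) := by unfold Spec_does_password_contain_symbols_only; infer_instance

-- ===== CLAIM (what is proved, stated in full; the proofs are below) =====
def Claim_equal_does_password_contain_symbols_only : Prop := ∀ (password : String), Dom_does_password_contain_symbols_only password → Spec_does_password_contain_symbols_only password (does_password_contain_symbols_only password)

-- ===== LEMMAS AND PROOFS =====

-- A's counter after the fold is the start value plus the number of matching characters.
theorem counter_foldl (l : List Char) (c : Int) :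
    l.foldl (fun counter i => if "!$%^&*()_-=+".toList.contains i then counter + 1 else counter) c
      = c + (l.countP (fun i => "!$%^&*()_-=+".toList.contains i) : Int) := by
  induction l generalizing c with
  | nil => simp
  | cons a t ih =>
    simp only [List.foldl_cons, List.countP_cons, ih]
    split_ifs with h
    · simp; ring
    · simp

-- stripChars leaves the empty list exactly when every character is in chars.
theorem stripChars_eq_nil_iff (s chars : List Char) :
    PySem.Chars.stripChars s chars = [] ↔ ∀ x ∈ s, chars.contains x := by
  unfold PySem.Chars.stripChars
  rw [List.reverse_eq_nil_iff, List.dropWhile_eq_nil_iff]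
  constructor
  · intro h
    have hnil : List.dropWhile (fun c => chars.contains c) s = [] := by
      rcases hd : List.dropWhile (fun c => chars.contains c) s with _ | ⟨a, t⟩
      · rfl
      · exfalso
        have ha : chars.contains a = false := by
          have := List.head?_dropWhile_not (fun c => chars.contains c) s
          rw [hd] at this; simpa using this
        have hm := h a (by rw [hd]; simp)
        rw [hm] at ha; simp at ha
    exact List.dropWhile_eq_nil_iff.mp hnil
  · intro h x hx
    have hx' : x ∈ s := (List.dropWhile_sublist _).mem (by simpa using hx)
    exact h x hx'

-- ===== VERDICT (by name: the statement is the Claim_ definition above) =====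
theorem does_password_contain_symbols_only_spec : Claim_equal_does_password_contain_symbols_only := by
  intro password _
  unfold Spec_does_password_contain_symbols_only
  unfold does_password_contain_symbols_only does_password_contain_symbols_only_alt
  simp only [counter_foldl, PySem.Str.len_eq, zero_add]
  rw [Bool.eq_iff_iff, decide_eq_true_iff, beq_iff_eq]
  have hB : PySem.Str.stripChars password "!$%^&*()_-=+" = "" ↔
      PySem.Chars.stripChars password.toList "!$%^&*()_-=+".toList = [] := by
    constructor
    · intro h
      have := congrArg String.toList h
      simpa [PySem.Str.toList_stripChars] using this
    · intro h
      have : (PySem.Str.stripChars password "!$%^&*()_-=+").toList = ("" : String).toList := by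
        simpa [PySem.Str.toList_stripChars] using h
      exact String.toList_inj.mp this
  rw [hB, stripChars_eq_nil_iff]
  have hcast : ((password.toList.countP (fun i => "!$%^&*()_-=+".toList.contains i) : Int)
      = (password.toList.length : Int)) ↔
      password.toList.countP (fun i => "!$%^&*()_-=+".toList.contains i)
        = password.toList.length := by exact_mod_cast Iff.rfl
  rw [hcast]
  constructor
  · intro h x hx
    exact List.countP_eq_length.mp h x hx
  · intro h
    exact List.countP_eq_length.mpr (by intro x hx; simpa using h x hx)
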